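-- pv_equiv track=rewrite | github.com/StukachDP/Algoritms | Hash_Table_Work.py | find_best_hash_table
-- ===== SOURCE A (Python) =====
-- def find_best_hash_table(hash_tables_list: list):
--     max_chain_length_list = []
--     for hash_table in hash_tables_list:
--         chain_length_list = []
--         for cell in hash_table:
--             chain_length_list.append(len(cell))
--         max_chain_length_list.append(max(chain_length_list))
--
--     return max_chain_length_list.index(min(max_chain_length_list)), min(max_chain_length_list)
-- ===== SOURCE B (Python) =====
-- def find_best_hash_table(hash_tables_list: list):
--     best_idx, best_val = 0, None
--     for idx, hash_table in enumerate(hash_tables_list):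
--         m = max(len(cell) for cell in hash_table)
--         if best_val is None or m < best_val:
--             best_idx, best_val = idx, m
--     return best_idx, best_val
-- ===== Notes on version B (the rewrite author's own statement) =====
-- stated objective: simpler
-- what changed: Single streaming pass keeping a running (best_idx, best_val) with strict-improvement updates, instead of materialising the list of per-table maxima and then rescanning it twice with min() and .index().
import Mathlib
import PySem

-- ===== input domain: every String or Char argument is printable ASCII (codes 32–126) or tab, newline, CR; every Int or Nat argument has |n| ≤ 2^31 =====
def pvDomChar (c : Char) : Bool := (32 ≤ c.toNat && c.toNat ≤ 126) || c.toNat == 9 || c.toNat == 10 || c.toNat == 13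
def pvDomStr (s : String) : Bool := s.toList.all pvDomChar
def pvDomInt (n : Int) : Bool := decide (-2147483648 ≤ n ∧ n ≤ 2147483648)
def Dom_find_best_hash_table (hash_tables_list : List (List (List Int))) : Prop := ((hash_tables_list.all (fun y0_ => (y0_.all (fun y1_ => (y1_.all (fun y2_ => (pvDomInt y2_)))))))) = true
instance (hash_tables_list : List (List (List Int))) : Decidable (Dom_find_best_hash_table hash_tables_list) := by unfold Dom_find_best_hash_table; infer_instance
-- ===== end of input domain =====

-- B replaces A's build-list + min() + .index() rescans by one streaming pass that keeps the
-- running best (index, value) with strict-improvement updates (objective: simpler).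

-- ===== PORT A =====
def find_best_hash_table (hash_tables_list : List (List (List Int))) : Int × Int :=
  let max_chain_length_list :=
    hash_tables_list.foldl (fun acc hash_table =>
      let chain_length_list :=
        hash_table.foldl (fun cl cell => cl ++ [(cell.length : Int)]) []
      acc ++ [(PySem.List.max? chain_length_list (fun x => x)).getD 0]) []
  let mn := (PySem.List.min? max_chain_length_list (fun x => x)).getD 0
  (((PySem.List.index? max_chain_length_list mn).getD 0 : Int), mn)

-- ===== PORT B =====
def find_best_hash_table_alt (hash_tables_list : List (List (List Int))) : Int × Int :=
  let st := (PySem.List.enumerate hash_tables_list 0).foldl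
    (fun (st : Int × Option Int) p =>
      let m := (PySem.List.max? (p.2.map (fun cell => (cell.length : Int))) (fun x => x)).getD 0
      match st.2 with
      | none => (p.1, some m)
      | some bv => if m < bv then (p.1, some m) else st) (0, none)
  (st.1, st.2.getD 0)

-- ===== PRECONDITION & SPEC =====
-- Pre_ excludes exactly the inputs on which Python A raises ValueError: the empty list
-- (min of an empty sequence) and any list containing an empty hash table (max of an empty sequence).
def Pre_find_best_hash_table (hash_tables_list : List (List (List Int))) : Prop :=
  hash_tables_list ≠ [] ∧ ∀ t ∈ hash_tables_list, t ≠ []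
instance (hash_tables_list : List (List (List Int))) : Decidable (Pre_find_best_hash_table hash_tables_list) := by unfold Pre_find_best_hash_table; infer_instance

def pvWitness_find_best_hash_table : List (List (List Int)) := [[[1], [2, 3]], [[4]]]

def Spec_find_best_hash_table (hash_tables_list : List (List (List Int))) (out : Int × Int) : Prop := out = find_best_hash_table_alt hash_tables_list
instance (hash_tables_list : List (List (List Int))) (out : Int × Int) : Decidable (Spec_find_best_hash_table hash_tables_list out) := by unfold Spec_find_best_hash_table; infer_instance

-- ===== CLAIM (what is proved, stated in full; the proofs are below) =====
def Claim_equal_find_best_hash_table : Prop := ∀ (hash_tables_list : List (List (List Int))), Dom_find_best_hash_table hash_tables_list → Pre_find_best_hash_table hash_tables_list → Spec_find_best_hash_table hash_tables_list (find_best_hash_table hash_tables_list)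

-- ===== LEMMAS AND PROOFS =====

-- the per-table maximum both programs compute
def pvG (t : List (List Int)) : Int :=
  (PySem.List.max? (t.map (fun cell => (cell.length : Int))) (fun x => x)).getD 0

-- A's append-accumulating inner loop is a map
theorem pv_foldl_append_map {α β : Type} (f : α → β) (l : List α) (acc : List β) :
    l.foldl (fun a x => a ++ [f x]) acc = acc ++ l.map f := by
  induction l generalizing acc with
  | nil => simp
  | cons x t ih => simp [List.foldl_cons, ih]

theorem pv_idxOf_getD (v : Int) (ms : List Int) (h : v ∈ ms) :
    ((PySem.List.index? ms v).getD 0 : Nat) = List.idxOf v ms := by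
  induction ms with
  | nil => cases h
  | cons m t ih =>
    by_cases hm : m = v
    · subst hm; rw [PySem.List.index?_cons_self]; simp [List.idxOf_cons_self]
    · rw [PySem.List.index?_cons_of_ne t hm]
      have hv : v ∈ t := by cases h with
        | head => exact absurd rfl hm
        | tail _ h => exact h
      have := PySem.List.index?_isSome_iff (xs := t) (v := v)
      rcases Option.isSome_iff_exists.mp (this.mpr hv) with ⟨k, hk⟩
      have hkidx : List.idxOf v t = k := by rw [← ih hv, hk]; rfl
      rw [hk, List.idxOf_cons_ne _ hm, hkidx]
      rfl

-- B's loop, once the running best is set, finds the first position of the running minimum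
theorem pv_loopB (l : List (List (List Int))) (s bi bv : Int) :
    (PySem.List.enumerate l s).foldl
      (fun (st : Int × Option Int) p =>
        let m := (PySem.List.max? (p.2.map (fun cell => (cell.length : Int))) (fun x => x)).getD 0
        match st.2 with
        | none => (p.1, some m)
        | some bv => if m < bv then (p.1, some m) else st) (bi, some bv)
    = (let mm := (l.map pvG).foldl min bv;
       if mm < bv then (s + (List.idxOf mm (l.map pvG) : Int), some mm) else (bi, some bv)) := by
  induction l generalizing s bi bv with
  | nil =>
    simp [PySem.List.enumerate_nil]
  | cons t rest ih =>
    rw [PySem.List.enumerate_cons, List.foldl_cons]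
    show (PySem.List.enumerate rest (s+1)).foldl _
        (if pvG t < bv then ((s : Int), some (pvG t)) else (bi, some bv)) = _
    by_cases hlt : pvG t < bv
    · rw [if_pos hlt, ih]
      have hmin : min bv (pvG t) = pvG t := min_eq_right (le_of_lt hlt)
      have hle : (rest.map pvG).foldl min (pvG t) ≤ pvG t :=
        (PySem.List.foldl_min_le (rest.map pvG) (pvG t)).1
      simp only [List.map_cons, List.foldl_cons, hmin]
      by_cases h2 : (rest.map pvG).foldl min (pvG t) < pvG t
      · have hne : pvG t ≠ (rest.map pvG).foldl min (pvG t) := ne_of_gt h2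
        rw [if_pos h2, if_pos (lt_trans h2 hlt)]
        rw [List.idxOf_cons_ne _ hne, Prod.mk.injEq]
        refine ⟨by push_cast; ring, rfl⟩
      · have heq : (rest.map pvG).foldl min (pvG t) = pvG t := le_antisymm hle (le_of_not_gt h2)
        rw [if_neg h2, heq, if_pos hlt, List.idxOf_cons_self]
        simp
    · rw [if_neg hlt, ih]
      have hmin : min bv (pvG t) = bv := min_eq_left (le_of_not_gt hlt)
      simp only [List.map_cons, List.foldl_cons, hmin]
      by_cases h2 : (rest.map pvG).foldl min bv < bv
      · have hne : pvG t ≠ (rest.map pvG).foldl min bv := ne_of_gt (lt_of_lt_of_le h2 (le_of_not_gt hlt))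
        rw [if_pos h2, if_pos h2, List.idxOf_cons_ne _ hne, Prod.mk.injEq]
        refine ⟨by push_cast; ring, rfl⟩
      · rw [if_neg h2, if_neg h2]

-- ===== VERDICT (by name: the statement is the Claim_ definition above) =====
theorem find_best_hash_table_spec : Claim_equal_find_best_hash_table := by
  intro l _ hpre
  obtain ⟨hne, -⟩ := hpre
  obtain ⟨t, rest, rfl⟩ := List.exists_cons_of_ne_nil hne
  show Spec_find_best_hash_table _ _
  unfold Spec_find_best_hash_table find_best_hash_table find_best_hash_table_alt
  simp only
  -- A's maxima list is a map of pvG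
  have hmaxes : (t :: rest).foldl (fun acc ht =>
      acc ++ [(PySem.List.max? (ht.foldl (fun cl cell => cl ++ [(cell.length : Int)]) []) (fun x => x)).getD 0]) []
      = (t :: rest).map pvG := by
    rw [pv_foldl_append_map (f := fun (ht : List (List Int)) =>
      (PySem.List.max? (ht.foldl (fun cl cell => cl ++ [(cell.length : Int)]) []) (fun x => x)).getD 0)]
    simp only [List.nil_append]
    apply List.map_congr_left
    intro ht _
    rw [pv_foldl_append_map (f := fun (cell : List Int) => (cell.length : Int)), List.nil_append]
    rfl
  rw [hmaxes]
  -- B's loop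
  rw [PySem.List.enumerate_cons, List.foldl_cons]
  show (_, _) = ((((PySem.List.enumerate rest (0+1)).foldl _ ((0 : Int), some (pvG t))).1),
                 (((PySem.List.enumerate rest (0+1)).foldl _ ((0 : Int), some (pvG t))).2.getD 0))
  rw [pv_loopB rest (0+1) 0 (pvG t)]
  -- A's min
  simp only [List.map_cons, PySem.List.min?_id_cons, Option.getD_some]
  set mm := List.foldl min (pvG t) (rest.map pvG) with hmm
  have hle : mm ≤ pvG t := (PySem.List.foldl_min_le (rest.map pvG) (pvG t)).1
  by_cases h2 : mm < pvG t
  · -- the minimum comes strictly later; mm ∈ rest.map pvG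
    have hmem : mm ∈ rest.map pvG := by
      rcases PySem.List.foldl_min_mem (rest.map pvG) (pvG t) with h | h
      · exact absurd h (ne_of_lt h2)
      · exact h
    have hidx := pv_idxOf_getD mm (pvG t :: rest.map pvG) (List.mem_cons_of_mem _ hmem)
    rw [List.idxOf_cons_ne _ (ne_of_gt h2)] at hidx
    rw [if_pos h2, Prod.mk.injEq]
    refine ⟨?_, rfl⟩
    rw [hidx]
    push_cast
    ring
  · have heq : mm = pvG t := le_antisymm hle (le_of_not_gt h2)
    have hidx := pv_idxOf_getD mm (pvG t :: rest.map pvG) (by rw [heq]; exact List.mem_cons_self)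
    rw [heq, List.idxOf_cons_self] at hidx
    rw [if_neg h2, Prod.mk.injEq]
    refine ⟨?_, by rw [heq]; rfl⟩
    rw [heq, hidx]
    rfl
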